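-- pv_equiv track=rewrite | github.com/thaminmg/leetcode | dynamic_programming/2369_check_if_there_is_a_valid_partion_for_the_array.py | validPartition
-- ===== SOURCE A (Python) =====
-- def validPartition(nums: list[int]) -> bool:
--     two = nums[-1] == nums[-2]
--     if len(nums) == 2:
--         return two
--     three = (nums[-1] == nums[-2] == nums[-3]) or (nums[-3] + 1 == nums[-2] == nums[-1] - 1)
--     dp = [three, two, False]
--     for i in range(len(nums) - 4, -1, -1):
--         cur = nums[i] == nums[i + 1] and dp[1]
--         cur = cur or (nums[i] == nums[i + 1] == nums[i + 2] or  nums[i] + 1 == nums[i + 1] == nums[i + 2] - 1) and dp[2]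
--         dp = [cur, dp[0], dp[1]]
--     return dp[0]
--
-- nums = [473928,473929,473930]
-- ===== SOURCE B (Python) =====
-- def validPartition(nums: list[int]) -> bool:
--     # Graph reachability: node i = "a valid block boundary before index i";
--     # edges i->i+2 (equal pair) and i->i+3 (equal or consecutive triple).
--     # Depth-first search from 0 with a visited array, early exit on reaching n.
--     n = len(nums)
--     seen = [False] * (n + 1)
--     seen[0] = True
--     stack = [0]
--     while stack:
--         i = stack.pop()
--         if i == n:
--             return True
--         if i + 2 <= n and nums[i] == nums[i + 1] and not seen[i + 2]:
--             seen[i + 2] = True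
--             stack.append(i + 2)
--         if i + 3 <= n and not seen[i + 3] and (
--             nums[i] == nums[i + 1] == nums[i + 2]
--             or nums[i] + 1 == nums[i + 1] == nums[i + 2] - 1
--         ):
--             seen[i + 3] = True
--             stack.append(i + 3)
--     return False
-- ===== Notes on version B (the rewrite author's own statement) =====
-- stated objective: alternative
-- what changed: Reformulates the partition check as reachability in the DAG of cut positions (edge i->i+2 for an equal pair, i->i+3 for an equal or consecutive triple) and solves it by an iterative depth-first search with an explicit stack and a visited array, exiting early when position n is reached, instead of A's backward rolling three-slot DP.
import Mathlib
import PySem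

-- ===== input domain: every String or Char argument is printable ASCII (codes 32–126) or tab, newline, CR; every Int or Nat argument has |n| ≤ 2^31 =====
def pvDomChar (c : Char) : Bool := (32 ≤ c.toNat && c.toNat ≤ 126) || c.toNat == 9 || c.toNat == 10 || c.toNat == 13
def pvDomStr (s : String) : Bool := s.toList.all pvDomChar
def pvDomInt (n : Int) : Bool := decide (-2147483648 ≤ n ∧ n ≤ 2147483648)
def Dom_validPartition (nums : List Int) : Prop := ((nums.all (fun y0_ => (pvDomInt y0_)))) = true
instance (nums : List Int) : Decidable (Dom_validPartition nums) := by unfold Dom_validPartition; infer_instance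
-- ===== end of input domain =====

-- B recasts the partition check as reachability in the DAG of cut positions
-- (edges i -> i+2 / i -> i+3) and solves it by an explicit-stack depth-first
-- search with a visited array, instead of A's backward rolling three-slot DP.

-- ===== PORT A =====
def validPartition (nums : List Int) : Bool :=
  let two := PySem.List.pyGetD nums (-1) 0 == PySem.List.pyGetD nums (-2) 0
  if nums.length == 2 then two
  else
    let three := (PySem.List.pyGetD nums (-1) 0 == PySem.List.pyGetD nums (-2) 0 &&
                  PySem.List.pyGetD nums (-2) 0 == PySem.List.pyGetD nums (-3) 0) ||
                 (PySem.List.pyGetD nums (-3) 0 + 1 == PySem.List.pyGetD nums (-2) 0 &&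
                  PySem.List.pyGetD nums (-2) 0 == PySem.List.pyGetD nums (-1) 0 - 1)
    let dp := (PySem.List.pyRange ((nums.length : Int) - 4) (-1) (-1)).foldl
      (fun dp i =>
        let cur := (PySem.List.pyGetD nums i 0 == PySem.List.pyGetD nums (i+1) 0) && dp.2.1
        let cur := cur ||
          ((PySem.List.pyGetD nums i 0 == PySem.List.pyGetD nums (i+1) 0 &&
            PySem.List.pyGetD nums (i+1) 0 == PySem.List.pyGetD nums (i+2) 0) ||
           (PySem.List.pyGetD nums i 0 + 1 == PySem.List.pyGetD nums (i+1) 0 &&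
            PySem.List.pyGetD nums (i+1) 0 == PySem.List.pyGetD nums (i+2) 0 - 1)) && dp.2.2
        (cur, dp.1, dp.2.1))
      (three, two, false)
    dp.1

-- ===== PORT B =====
-- termination helpers for the DFS loop (cited by decreasing_by)
theorem count_false_set_true (l : List Bool) (j : Nat) (hj : j < l.length) (hf : l[j] = false) :
    (l.set j true).count false + 1 = l.count false := by
  induction l generalizing j with
  | nil => simp at hj
  | cons b t ih =>
    cases j with
    | zero =>
      have hb : b = false := hf
      subst hb
      simp
    | succ j =>
      have := ih j (by simpa using hj) (by simpa using hf)
      simp only [List.set, List.count_cons]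
      omega

-- the shared "push j if its edge condition holds and j is unvisited" step of Source B's
-- two ifs; 'seen' reads default to true out of range (a totality guard only: in every
-- actual call seen has length nums.length+1 and every pushed index is ≤ nums.length)
def pushEdge (seen : List Bool) (st : List Nat) (c : Bool) (j : Nat) : List Bool × List Nat :=
  if c && !(seen.getD j true) then (seen.set j true, j :: st) else (seen, st)

theorem pushEdge_measure (seen : List Bool) (st : List Nat) (c : Bool) (j : Nat) :
    (pushEdge seen st c j).1.count false + (pushEdge seen st c j).2.length ≤
      seen.count false + st.length := by
  unfold pushEdge
  split
  · next h =>
    have hgetD : seen.getD j true = false := by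
      rcases Bool.and_eq_true .. |>.mp h with ⟨_, h2⟩
      simpa using h2
    have hj : j < seen.length := by
      by_contra hge
      rw [List.getD_eq_getElem?_getD, List.getElem?_eq_none (by omega)] at hgetD
      simp at hgetD
    have hf : seen[j] = false := by
      rw [List.getD_eq_getElem?_getD, List.getElem?_eq_getElem hj] at hgetD
      simpa using hgetD
    have := count_false_set_true seen j hj hf
    simp only [List.length_cons]
    omega
  · exact le_refl _

-- DFS over cut positions 0..n with an explicit stack and visited list (Source B's loop)
def dfsLoop (nums : List Int) (n : Nat) (seen : List Bool) (stack : List Nat) : Bool :=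
  match stack with
  | [] => false
  | i :: rest =>
    if i = n then true
    else
      let s1 := pushEdge seen rest
        (decide (i + 2 ≤ n) && (nums.getD i 0 == nums.getD (i+1) 0)) (i+2)
      let s2 := pushEdge s1.1 s1.2
        (decide (i + 3 ≤ n) &&
          ((nums.getD i 0 == nums.getD (i+1) 0 && nums.getD (i+1) 0 == nums.getD (i+2) 0) ||
           (nums.getD i 0 + 1 == nums.getD (i+1) 0 && nums.getD (i+1) 0 == nums.getD (i+2) 0 - 1)))
        (i+3)
      dfsLoop nums n s2.1 s2.2
termination_by seen.count false + stack.length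
decreasing_by
  simp only [List.length_cons]
  exact Nat.lt_succ_of_le (Nat.le_trans (pushEdge_measure _ _ _ _) (pushEdge_measure _ _ _ _))

def validPartition_alt (nums : List Int) : Bool :=
  let n := nums.length
  dfsLoop nums n ((List.replicate (n + 1) false).set 0 true) [0]

-- ===== PRECONDITION & SPEC =====
-- A reads the last two elements unconditionally, so it raises IndexError on lists of length < 2.
def Pre_validPartition (nums : List Int) : Prop := 2 ≤ nums.length
instance (nums : List Int) : Decidable (Pre_validPartition nums) := by
  unfold Pre_validPartition; infer_instance
def pvWitness_validPartition : List Int := [1, 1]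

def Spec_validPartition (nums : List Int) (out : Bool) : Prop := out = validPartition_alt nums
instance (nums : List Int) (out : Bool) : Decidable (Spec_validPartition nums out) := by
  unfold Spec_validPartition; infer_instance

-- ===== CLAIM (what is proved, stated in full; the proofs are below) =====
def Claim_equal_validPartition : Prop := ∀ (nums : List Int), Dom_validPartition nums →
  Pre_validPartition nums → Spec_validPartition nums (validPartition nums)

-- ===== LEMMAS AND PROOFS =====

-- canonical front-to-back recursion computing "suffix is partitionable"
def canValid : List Int → Bool
  | [] => true
  | [_] => false
  | [a, b] => a == b
  | a :: b :: c :: l =>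
      (a == b && canValid (c :: l)) ||
      (((a == b && b == c) || (a + 1 == b && b == c - 1)) && canValid l)

theorem beq_comm_int (a b : Int) : (b == a) = (a == b) := by
  rw [Bool.eq_iff_iff]
  constructor <;> (intro h; simp only [beq_iff_eq] at *; omega)

theorem canValid_drop_step (nums : List Int) (j : Nat) (h : j + 3 ≤ nums.length) :
    canValid (nums.drop j) =
      (((nums.getD j 0 == nums.getD (j+1) 0) && canValid (nums.drop (j+2))) ||
       (((nums.getD j 0 == nums.getD (j+1) 0 && nums.getD (j+1) 0 == nums.getD (j+2) 0) ||
         (nums.getD j 0 + 1 == nums.getD (j+1) 0 && nums.getD (j+1) 0 == nums.getD (j+2) 0 - 1)) &&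
         canValid (nums.drop (j+3)))) := by
  have h0 : j < nums.length := by omega
  have h1 : j + 1 < nums.length := by omega
  have h2 : j + 2 < nums.length := by omega
  rw [List.getD_eq_getElem _ _ h0, List.getD_eq_getElem _ _ h1, List.getD_eq_getElem _ _ h2]
  rw [List.drop_eq_getElem_cons h0, List.drop_eq_getElem_cons h1, List.drop_eq_getElem_cons h2]
  rfl

theorem loopA (nums : List Int) : ∀ (j : Nat), j + 3 ≤ nums.length →
    (PySem.List.pyRange ((j : Int) - 1) (-1) (-1)).foldl
      (fun dp i =>
        let cur := (PySem.List.pyGetD nums i 0 == PySem.List.pyGetD nums (i+1) 0) && dp.2.1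
        let cur := cur ||
          ((PySem.List.pyGetD nums i 0 == PySem.List.pyGetD nums (i+1) 0 &&
            PySem.List.pyGetD nums (i+1) 0 == PySem.List.pyGetD nums (i+2) 0) ||
           (PySem.List.pyGetD nums i 0 + 1 == PySem.List.pyGetD nums (i+1) 0 &&
            PySem.List.pyGetD nums (i+1) 0 == PySem.List.pyGetD nums (i+2) 0 - 1)) && dp.2.2
        (cur, dp.1, dp.2.1))
      (canValid (nums.drop j), canValid (nums.drop (j+1)), canValid (nums.drop (j+2)))
    = (canValid nums, canValid (nums.drop 1), canValid (nums.drop 2)) := by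
  intro j
  induction j with
  | zero =>
    intro _
    rw [PySem.List.pyRange_neg_one_eq_nil (by norm_num)]
    simp
  | succ j ih =>
    intro hj
    have hcast : ((j + 1 : Nat) : Int) - 1 = (j : Int) := by push_cast; ring
    rw [hcast, PySem.List.pyRange_neg_one_cons (by omega)]
    rw [List.foldl_cons]
    have hstep : canValid (nums.drop j) =
        (((nums.getD j 0 == nums.getD (j+1) 0) && canValid (nums.drop (j+2))) ||
         (((nums.getD j 0 == nums.getD (j+1) 0 && nums.getD (j+1) 0 == nums.getD (j+2) 0) ||
           (nums.getD j 0 + 1 == nums.getD (j+1) 0 && nums.getD (j+1) 0 == nums.getD (j+2) 0 - 1)) &&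
           canValid (nums.drop (j+3)))) := canValid_drop_step nums j (by omega)
    refine Eq.trans ?_ (ih (by omega))
    congr 1
    have c1 : (j : Int) + 1 = ((j + 1 : Nat) : Int) := by push_cast; ring
    have c2 : (j : Int) + 2 = ((j + 2 : Nat) : Int) := by push_cast; ring
    rw [c1, c2]
    simp only [PySem.List.pyGetD_natCast]
    simp only [show j + 1 + 1 = j + 2 from rfl, show j + 1 + 2 = j + 3 from rfl]
    rw [hstep]

theorem A_eq_canValid (nums : List Int) (h : 2 ≤ nums.length) :
    validPartition nums = canValid nums := by
  by_cases h2 : nums.length = 2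
  · rcases nums with _ | ⟨a, _ | ⟨b, _ | ⟨c, t⟩⟩⟩ <;> simp_all
    · simp [validPartition, canValid, PySem.List.pyGetD, PySem.List.pyGet?, PySem.List.pyIdx?]
      exact eq_comm
  · have h3 : 3 ≤ nums.length := by omega
    have hn1 : nums.length - 1 < nums.length := by omega
    have hn2 : nums.length - 2 < nums.length := by omega
    have hn3 : nums.length - 3 < nums.length := by omega
    have hd3 : nums.drop (nums.length - 3) = [nums[nums.length - 3], nums[nums.length - 2], nums[nums.length - 1]] := by
      rw [List.drop_eq_getElem_cons hn3, show nums.length - 3 + 1 = nums.length - 2 by omega,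
          List.drop_eq_getElem_cons hn2, show nums.length - 2 + 1 = nums.length - 1 by omega,
          List.drop_eq_getElem_cons hn1, show nums.length - 1 + 1 = nums.length by omega,
          List.drop_length]
    have hd2 : nums.drop (nums.length - 2) = [nums[nums.length - 2], nums[nums.length - 1]] := by
      rw [List.drop_eq_getElem_cons hn2, show nums.length - 2 + 1 = nums.length - 1 by omega,
          List.drop_eq_getElem_cons hn1, show nums.length - 1 + 1 = nums.length by omega,
          List.drop_length]
    have hd1 : nums.drop (nums.length - 1) = [nums[nums.length - 1]] := by
      rw [List.drop_eq_getElem_cons hn1, show nums.length - 1 + 1 = nums.length by omega,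
          List.drop_length]
    have hg1 := PySem.List.pyGetD_neg_ofNat nums 1 0 (by omega) (by omega)
    have hg2 := PySem.List.pyGetD_neg_ofNat nums 2 0 (by omega) (by omega)
    have hg3 := PySem.List.pyGetD_neg_ofNat nums 3 0 (by omega) (by omega)
    have hrange : ((nums.length : Int) - 4) = ((nums.length - 3 : Nat) : Int) - 1 := by omega
    simp only [validPartition, if_neg (show ¬((nums.length == 2) = true) by simp [h2])]
    rw [hg1, hg2, hg3, hrange]
    have hinit : ∀ x y z : Bool, (x, y, z) =
        (canValid (nums.drop (nums.length - 3)), canValid (nums.drop (nums.length - 3 + 1)),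
         canValid (nums.drop (nums.length - 3 + 2))) →
        ((PySem.List.pyRange (((nums.length - 3 : Nat) : Int) - 1) (-1) (-1)).foldl
          (fun dp i =>
            let cur := (PySem.List.pyGetD nums i 0 == PySem.List.pyGetD nums (i+1) 0) && dp.2.1
            let cur := cur ||
              ((PySem.List.pyGetD nums i 0 == PySem.List.pyGetD nums (i+1) 0 &&
                PySem.List.pyGetD nums (i+1) 0 == PySem.List.pyGetD nums (i+2) 0) ||
               (PySem.List.pyGetD nums i 0 + 1 == PySem.List.pyGetD nums (i+1) 0 &&
                PySem.List.pyGetD nums (i+1) 0 == PySem.List.pyGetD nums (i+2) 0 - 1)) && dp.2.2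
            (cur, dp.1, dp.2.1)) (x, y, z)).1 = canValid nums := by
      intro x y z hxyz
      rw [hxyz, show nums.length - 3 + 1 = nums.length - 2 by omega,
          show nums.length - 3 + 2 = nums.length - 1 by omega,
          show nums.length - 2 = nums.length - 3 + 1 by omega,
          show nums.length - 1 = nums.length - 3 + 2 by omega]
      rw [loopA nums (nums.length - 3) (by omega)]
    apply hinit
    rw [hd3, show nums.length - 3 + 1 = nums.length - 2 by omega,
        show nums.length - 3 + 2 = nums.length - 1 by omega, hd2, hd1]
    simp only [Prod.mk.injEq]
    refine ⟨?_, ?_, rfl⟩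
    · simp only [canValid, Bool.and_false, Bool.false_or, Bool.and_true]
      rw [Bool.eq_iff_iff]
      simp only [Bool.or_eq_true, Bool.and_eq_true, beq_iff_eq]
      omega
    · simp only [canValid]
      exact beq_comm_int ..

-- ---- the cut-position graph ----
def E2 (nums : List Int) (i : Nat) : Prop :=
  i + 2 ≤ nums.length ∧ nums.getD i 0 = nums.getD (i+1) 0
def E3 (nums : List Int) (i : Nat) : Prop :=
  i + 3 ≤ nums.length ∧
    ((nums.getD i 0 = nums.getD (i+1) 0 ∧ nums.getD (i+1) 0 = nums.getD (i+2) 0) ∨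
     (nums.getD i 0 + 1 = nums.getD (i+1) 0 ∧ nums.getD (i+1) 0 = nums.getD (i+2) 0 - 1))

-- reachable from cut 0
inductive ReachR (nums : List Int) : Nat → Prop
  | zero : ReachR nums 0
  | two {i : Nat} : ReachR nums i → E2 nums i → ReachR nums (i+2)
  | three {i : Nat} : ReachR nums i → E3 nums i → ReachR nums (i+3)

-- a path from cut i to cut n exists
inductive PathP (nums : List Int) : Nat → Prop
  | base : PathP nums nums.length
  | two {i : Nat} : E2 nums i → PathP nums (i+2) → PathP nums i
  | three {i : Nat} : E3 nums i → PathP nums (i+3) → PathP nums i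

theorem canValid_drop_iff (nums : List Int) (i : Nat) (hi : i ≤ nums.length) :
    canValid (nums.drop i) = true ↔
      (i = nums.length ∨
       (E2 nums i ∧ canValid (nums.drop (i+2)) = true) ∨
       (E3 nums i ∧ canValid (nums.drop (i+3)) = true)) := by
  rcases Nat.lt_or_ge (i + 3) (nums.length + 1) with h3 | h3
  · rw [canValid_drop_step nums i (by omega)]
    simp only [Bool.or_eq_true, Bool.and_eq_true, beq_iff_eq, E2, E3]
    constructor
    · rintro (⟨he, hc⟩ | ⟨ht, hc⟩)
      · exact Or.inr (Or.inl ⟨⟨by omega, he⟩, hc⟩)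
      · refine Or.inr (Or.inr ⟨⟨by omega, ?_⟩, hc⟩)
        rcases ht with ⟨x, y⟩ | ⟨x, y⟩
        · exact Or.inl ⟨x, y⟩
        · exact Or.inr ⟨x, by omega⟩
    · rintro (hn | ⟨⟨_, he⟩, hc⟩ | ⟨⟨_, ht⟩, hc⟩)
      · omega
      · exact Or.inl ⟨he, hc⟩
      · refine Or.inr ⟨?_, hc⟩
        rcases ht with ⟨x, y⟩ | ⟨x, y⟩
        · exact Or.inl ⟨x, y⟩
        · exact Or.inr ⟨x, by omega⟩
  · -- i ≥ n - 2 : no triple edge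
    rcases Nat.lt_or_ge (i + 2) (nums.length + 1) with h2 | h2
    · -- i = n - 2
      have hlt0 : i < nums.length := by omega
      have hlt1 : i + 1 < nums.length := by omega
      have hd : nums.drop i = [nums[i], nums[i+1]] := by
        rw [List.drop_eq_getElem_cons hlt0, List.drop_eq_getElem_cons hlt1,
            List.drop_eq_nil_of_le (by omega)]
      have hg0 : nums.getD i 0 = nums[i] := List.getD_eq_getElem _ _ hlt0
      have hg1 : nums.getD (i+1) 0 = nums[i+1] := List.getD_eq_getElem _ _ hlt1
      rw [hd]
      simp only [canValid, beq_iff_eq, E2, E3]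
      constructor
      · intro h
        refine Or.inr (Or.inl ⟨⟨by omega, by rw [hg0, hg1]; exact h⟩, ?_⟩)
        rw [List.drop_eq_nil_of_le (by omega)]
        rfl
      · rintro (hn | ⟨⟨_, he⟩, _⟩ | ⟨⟨hb, _⟩, _⟩)
        · omega
        · rw [hg0, hg1] at he; exact he
        · omega
    · rcases Nat.lt_or_ge i nums.length with h1 | h1
      · -- i = n - 1
        have hd : nums.drop i = [nums[i]] := by
          rw [List.drop_eq_getElem_cons h1, List.drop_eq_nil_of_le (by omega)]
        rw [hd]
        simp only [canValid, E2, E3]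
        constructor
        · intro h; exact absurd h (by simp)
        · rintro (hn | ⟨⟨hb, _⟩, _⟩ | ⟨⟨hb, _⟩, _⟩) <;> omega
      · -- i = n
        have hin : i = nums.length := by omega
        rw [List.drop_eq_nil_of_le (by omega)]
        simp [canValid, hin]

theorem canValid_iff_PathP (nums : List Int) : ∀ (k i : Nat), nums.length = i + k →
    (canValid (nums.drop i) = true ↔ PathP nums i) := by
  intro k
  induction k using Nat.strong_induction_on with
  | _ k ih =>
    intro i hk
    rw [canValid_drop_iff nums i (by omega)]
    constructor
    · rintro (hn | ⟨he, hc⟩ | ⟨he, hc⟩)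
      · rw [hn]; exact PathP.base
      · have := (ih (k - 2) (by have := he.1; omega) (i + 2) (by have := he.1; omega)).mp hc
        exact PathP.two he this
      · have := (ih (k - 3) (by have := he.1; omega) (i + 3) (by have := he.1; omega)).mp hc
        exact PathP.three he this
    · intro hp
      cases hp with
      | base => exact Or.inl rfl
      | two he hp =>
        have := (ih (k - 2) (by have := he.1; omega) (i + 2) (by have := he.1; omega)).mpr hp
        exact Or.inr (Or.inl ⟨he, this⟩)
      | three he hp =>
        have := (ih (k - 3) (by have := he.1; omega) (i + 3) (by have := he.1; omega)).mpr hp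
        exact Or.inr (Or.inr ⟨he, this⟩)

theorem PathP_ReachR (nums : List Int) : ∀ (i : Nat), PathP nums i → ReachR nums i →
    ReachR nums nums.length := by
  intro i hp
  induction hp with
  | base => exact fun h => h
  | two he _ ih => exact fun hr => ih (ReachR.two hr he)
  | three he _ ih => exact fun hr => ih (ReachR.three hr he)

theorem ReachR_PathP (nums : List Int) : ∀ (j : Nat), ReachR nums j → PathP nums j →
    PathP nums 0 := by
  intro j hr
  induction hr with
  | zero => exact fun h => h
  | two _ he ih => exact fun hp => ih (PathP.two he hp)
  | three _ he ih => exact fun hp => ih (PathP.three he hp)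

theorem canValid_iff_ReachR (nums : List Int) :
    canValid nums = true ↔ ReachR nums nums.length := by
  have h0 := canValid_iff_PathP nums nums.length 0 (by omega)
  rw [List.drop_zero] at h0
  rw [h0]
  exact ⟨fun hp => PathP_ReachR nums 0 hp ReachR.zero,
         fun hr => ReachR_PathP nums nums.length hr PathP.base⟩

-- ---- facts about pushEdge ----
theorem pushEdge_subset {seen : List Bool} {st : List Nat} {c : Bool} {j j' : Nat}
    (h : j' ∈ st) : j' ∈ (pushEdge seen st c j).2 := by
  unfold pushEdge; split <;> simp [h]

theorem pushEdge_mem {seen : List Bool} {st : List Nat} {c : Bool} {j j' : Nat}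
    (h : j' ∈ (pushEdge seen st c j).2) : (j' = j ∧ c = true) ∨ j' ∈ st := by
  unfold pushEdge at h
  split at h
  · next hc =>
    rcases List.mem_cons.mp h with h | h
    · exact Or.inl ⟨h, (Bool.and_eq_true .. |>.mp hc).1⟩
    · exact Or.inr h
  · exact Or.inr h

theorem pushEdge_mono {seen : List Bool} {st : List Nat} {c : Bool} {j j' : Nat}
    (h : seen.getD j' true = true) : (pushEdge seen st c j).1.getD j' true = true := by
  unfold pushEdge
  split
  · by_cases hj : j' = j
    · subst hj
      by_cases hl : j' < seen.length
      · rw [List.getD_eq_getElem?_getD, List.getElem?_set_self (by omega)]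
        simp
      · rw [List.getD_eq_getElem?_getD, List.getElem?_eq_none (by simp; omega)]
        rfl
    · rw [List.getD_eq_getElem?_getD, List.getElem?_set_ne (by omega)]
      rw [List.getD_eq_getElem?_getD] at h
      exact h
  · exact h

theorem pushEdge_post (seen : List Bool) (st : List Nat) {c : Bool} (j : Nat)
    (hc : c = true) : (pushEdge seen st c j).1.getD j true = true := by
  unfold pushEdge
  split
  · by_cases hl : j < seen.length
    · rw [List.getD_eq_getElem?_getD, List.getElem?_set_self (by omega)]
      simp
    · rw [List.getD_eq_getElem?_getD, List.getElem?_eq_none (by simp; omega)]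
      rfl
  · next hcond =>
    cases hs : seen.getD j true
    · rw [hc, hs] at hcond; simp at hcond
    · rfl

theorem pushEdge_new {seen : List Bool} {st : List Nat} {c : Bool} {j j' : Nat}
    (h : (pushEdge seen st c j).1.getD j' true = true) :
    seen.getD j' true = true ∨ j' ∈ (pushEdge seen st c j).2 := by
  by_cases hc : (c && !(seen.getD j true)) = true
  · simp only [pushEdge, if_pos hc] at h ⊢
    by_cases hj : j' = j
    · subst hj; simp
    · left
      rw [List.getD_eq_getElem?_getD, List.getElem?_set_ne (by omega)] at h
      rw [List.getD_eq_getElem?_getD]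
      exact h
  · simp only [pushEdge, if_neg hc] at h ⊢
    exact Or.inl h

-- boolean edge conditions used by the port agree with E2/E3
theorem c2_iff_E2 (nums : List Int) (i : Nat) :
    (decide (i + 2 ≤ nums.length) && (nums.getD i 0 == nums.getD (i+1) 0)) = true ↔
      E2 nums i := by
  simp [E2]

theorem c3_iff_E3 (nums : List Int) (i : Nat) :
    (decide (i + 3 ≤ nums.length) &&
      ((nums.getD i 0 == nums.getD (i+1) 0 && nums.getD (i+1) 0 == nums.getD (i+2) 0) ||
       (nums.getD i 0 + 1 == nums.getD (i+1) 0 && nums.getD (i+1) 0 == nums.getD (i+2) 0 - 1))) = true ↔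
      E3 nums i := by
  simp [E3]

-- ---- DFS soundness: if it answers true, n is reachable ----
theorem dfs_sound (nums : List Int) : ∀ (seen : List Bool) (stack : List Nat),
    (∀ j ∈ stack, ReachR nums j) →
    dfsLoop nums nums.length seen stack = true → ReachR nums nums.length := by
  intro seen stack
  induction seen, stack using dfsLoop.induct nums nums.length with
  | case1 seen =>
    intro _ h
    simp [dfsLoop] at h
  | case2 seen rest =>
    intro hst _
    exact hst nums.length (by simp)
  | case3 seen i rest hne s1 s2 ih =>
    intro hst h
    simp only [dfsLoop, if_neg hne] at h
    refine ih ?_ h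
    intro j hj
    rcases pushEdge_mem hj with ⟨rfl, hc⟩ | hj1
    · exact ReachR.three (hst i (by simp)) ((c3_iff_E3 nums i).mp hc)
    · rcases pushEdge_mem hj1 with ⟨rfl, hc⟩ | hj2
      · exact ReachR.two (hst i (by simp)) ((c2_iff_E2 nums i).mp hc)
      · exact hst j (by simp [hj2])

-- closure invariant for the completeness direction
def Closed (nums : List Int) (seen : List Bool) (stack : List Nat) : Prop :=
  ∀ j : Nat, seen.getD j true = true →
    j ∈ stack ∨ (j ≠ nums.length ∧
      (E2 nums j → seen.getD (j+2) true = true) ∧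
      (E3 nums j → seen.getD (j+3) true = true))

theorem reach_seen (nums : List Int) (seen : List Bool)
    (h0 : seen.getD 0 true = true) (hcl : Closed nums seen []) :
    ∀ j, ReachR nums j → seen.getD j true = true := by
  intro j hr
  induction hr with
  | zero => exact h0
  | two hr he ih =>
    rcases hcl _ ih with h | ⟨_, h2, _⟩
    · simp at h
    · exact h2 he
  | three hr he ih =>
    rcases hcl _ ih with h | ⟨_, _, h3⟩
    · simp at h
    · exact h3 he

theorem dfs_complete (nums : List Int) : ∀ (seen : List Bool) (stack : List Nat),
    seen.getD 0 true = true → Closed nums seen stack →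
    dfsLoop nums nums.length seen stack = false → ¬ ReachR nums nums.length := by
  intro seen stack
  induction seen, stack using dfsLoop.induct nums nums.length with
  | case1 seen =>
    intro h0 hcl _ hr
    have hn := reach_seen nums seen h0 hcl _ hr
    rcases hcl _ hn with h | ⟨hne, _⟩
    · simp at h
    · exact hne rfl
  | case2 seen rest =>
    intro _ _ h
    simp [dfsLoop] at h
  | case3 seen i rest hne s1 s2 ih =>
    intro h0 hcl h
    simp only [dfsLoop, if_neg hne] at h
    refine ih ?_ ?_ h
    · exact pushEdge_mono (pushEdge_mono h0)
    · -- closure is preserved by processing i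
      intro j hj
      rcases pushEdge_new hj with hj1 | hmem
      · rcases pushEdge_new hj1 with hj0 | hmem1
        · -- j was already seen before this step
          rcases hcl j hj0 with hst | ⟨hjn, h2, h3⟩
          · rcases List.mem_cons.mp hst with hji | hrest
            · -- j = i : now fully processed; its successors are seen after the pushes
              subst hji
              refine Or.inr ⟨hne, ?_, ?_⟩
              · intro he
                exact pushEdge_mono (pushEdge_post _ _ (j+2) ((c2_iff_E2 nums j).mpr he))
              · intro he
                exact pushEdge_post _ _ (j+3) ((c3_iff_E3 nums j).mpr he)
            · exact Or.inl (pushEdge_subset (pushEdge_subset hrest))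
          · exact Or.inr ⟨hjn, fun he => pushEdge_mono (pushEdge_mono (h2 he)),
              fun he => pushEdge_mono (pushEdge_mono (h3 he))⟩
        · exact Or.inl (pushEdge_subset hmem1)
      · exact Or.inl hmem

-- initial visited list: exactly cut 0 is seen (in range)
theorem seen0_getD (n : Nat) (j : Nat) :
    (((List.replicate (n + 1) false).set 0 true).getD j true = true) ↔ (j = 0 ∨ n + 1 ≤ j) := by
  rcases Nat.eq_zero_or_pos j with rfl | hj
  · simp [List.replicate_succ]
  · rw [List.getD_eq_getElem?_getD]
    rcases Nat.lt_or_ge j (n + 1) with hlt | hge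
    · rw [List.getElem?_set_ne (by omega)]
      simp [hlt]
      omega
    · rw [List.getElem?_eq_none (by simpa using hge)]
      simp
      omega

theorem B_iff_canValid (nums : List Int) :
    validPartition_alt nums = true ↔ canValid nums = true := by
  have h0 : (((List.replicate (nums.length + 1) false).set 0 true).getD 0 true = true) :=
    (seen0_getD nums.length 0).mpr (Or.inl rfl)
  have hcl : Closed nums ((List.replicate (nums.length + 1) false).set 0 true) [0] := by
    intro j hj
    rcases (seen0_getD nums.length j).mp hj with rfl | hge
    · exact Or.inl (by simp)
    · refine Or.inr ⟨by omega, ?_, ?_⟩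
      · intro he; exact absurd he.1 (by omega)
      · intro he; exact absurd he.1 (by omega)
  constructor
  · intro h
    rw [canValid_iff_ReachR]
    exact dfs_sound nums _ _ (by intro j hj; simp at hj; subst hj; exact ReachR.zero) h
  · intro h
    cases hb : validPartition_alt nums
    · exfalso
      have hr := (canValid_iff_ReachR nums).mp h
      exact dfs_complete nums _ _ h0 hcl hb hr
    · rfl

-- ===== VERDICT (by name: the statement is the Claim_ definition above) =====
theorem validPartition_spec : Claim_equal_validPartition := by
  intro nums _ hpre
  unfold Spec_validPartition
  rw [A_eq_canValid nums hpre]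
  exact (Bool.eq_iff_iff.mpr (B_iff_canValid nums)).symm
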